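-- pv_equiv track=rewrite | github.com/hdbookie/hunterXCodingAgent | mobile_surf_agent.py | _extract_component_specs
-- ===== SOURCE A (Python) =====
-- def _extract_component_specs(prd_content: str) -> str:
--     """Extract component specifications from PRD."""
--     lines = prd_content.split('\n')
--     in_components = False
--     component_lines = []
--
--     for line in lines:
--         if "ui component" in line.lower():
--             in_components = True
--         elif line.startswith('##') and in_components and "component" not in line.lower():
--             break
--         elif in_components:
--             component_lines.append(line)
--
--     return '\n'.join(component_lines)
-- ===== SOURCE B (Python) =====
-- def _extract_component_specs(prd_content: str) -> str:
--     """Extract component specifications from PRD (index-based: find start, find end, slice+filter)."""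
--     lines = prd_content.split('\n')
--     start = next((i for i, line in enumerate(lines) if 'ui component' in line.lower()), None)
--     if start is None:
--         return ''
--     end = next((j for j in range(start + 1, len(lines))
--                 if lines[j].startswith('##') and 'component' not in lines[j].lower()),
--                len(lines))
--     return '\n'.join(line for line in lines[start + 1:end]
--                      if 'ui component' not in line.lower())
-- ===== Notes on version B (the rewrite author's own statement) =====
-- stated objective: alternative
-- what changed: Replaces A's single stateful flag-carrying loop by an index-based decomposition: locate the first 'ui component' line, locate the terminating '##' heading after it, then slice that range and filter out trigger lines.
import Mathlib
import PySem

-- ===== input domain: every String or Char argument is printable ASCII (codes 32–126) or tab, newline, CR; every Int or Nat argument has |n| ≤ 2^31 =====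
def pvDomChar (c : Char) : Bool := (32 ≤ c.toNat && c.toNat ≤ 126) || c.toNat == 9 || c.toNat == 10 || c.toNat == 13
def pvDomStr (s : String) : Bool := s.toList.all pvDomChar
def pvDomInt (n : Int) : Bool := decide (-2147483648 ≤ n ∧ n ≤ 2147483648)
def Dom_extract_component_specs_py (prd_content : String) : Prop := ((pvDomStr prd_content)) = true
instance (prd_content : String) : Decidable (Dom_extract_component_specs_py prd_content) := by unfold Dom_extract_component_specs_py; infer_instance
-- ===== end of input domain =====

-- B replaces A's flag-carrying loop by an index-based decomposition (find start, find end, slice+filter); same cost, proved equal on all inputs.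

-- ===== PORT A =====
-- "ui component" in line.lower()
def pvTrig (l : String) : Bool := PySem.Str.isIn "ui component" (PySem.Str.lower l)
-- line.startswith('##') and "component" not in line.lower()
def pvStop (l : String) : Bool := PySem.Str.startswith l "##" && !PySem.Str.isIn "component" (PySem.Str.lower l)

-- A's for-loop over lines with state (in_components, component_lines); 'break' returns the accumulator
def pvALoop : List String → Bool → List String → List String
  | [], _, acc => acc
  | l :: rest, inc, acc =>
    if pvTrig l then pvALoop rest true acc
    else if pvStop l && inc then acc
    else if inc then pvALoop rest inc (acc ++ [l])
    else pvALoop rest inc acc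

def extract_component_specs_py (prd_content : String) : String :=
  PySem.Str.join "\n" (pvALoop ((PySem.Str.split? prd_content "\n").getD []) false [])

-- ===== PORT B =====
-- next((i for i, line in enumerate(lines) if 'ui component' in line.lower()), None),
-- returned as the suffix after the start line (lines[start+1:])
def pvFindRest : List String → Option (List String)
  | [] => none
  | l :: rest => if pvTrig l then some rest else pvFindRest rest

def extract_component_specs_py_alt (prd_content : String) : String :=
  match pvFindRest ((PySem.Str.split? prd_content "\n").getD []) with
  | none => ""
  | some rest =>
    -- lines[start+1:end] (end = first stop heading, or len) then filter out trigger lines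
    PySem.Str.join "\n" ((rest.takeWhile (fun l => !pvStop l)).filter (fun l => !pvTrig l))

-- ===== PRECONDITION & SPEC =====
def Spec_extract_component_specs_py (prd_content : String) (out : String) : Prop := out = extract_component_specs_py_alt prd_content
instance (prd_content : String) (out : String) : Decidable (Spec_extract_component_specs_py prd_content out) := by unfold Spec_extract_component_specs_py; infer_instance

-- ===== CLAIM (what is proved, stated in full; the proofs are below) =====
def Claim_equal_extract_component_specs_py : Prop := ∀ (prd_content : String), Dom_extract_component_specs_py prd_content → Spec_extract_component_specs_py prd_content (extract_component_specs_py prd_content)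

-- ===== LEMMAS AND PROOFS =====

-- a line containing "ui component" contains "component", so it is never a stop heading
theorem pvTrig_not_stop (l : String) (h : pvTrig l = true) : pvStop l = false := by
  simp only [pvTrig, PySem.Str.isIn_eq, PySem.Str.toList_lower, PySem.Chars.isIn_iff_infix] at h
  have h2 : (("component".toList : List Char) <:+: ("ui component".toList : List Char)) := by decide
  have h3 := h2.trans h
  simp only [pvStop, PySem.Str.isIn_eq, PySem.Str.toList_lower, PySem.Chars.isIn_iff_infix,
    Bool.and_eq_false_imp, Bool.not_eq_false']
  intro _
  exact h3

-- inside the section, A's loop collects exactly the truncated-and-filtered suffix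
theorem pvALoop_true (rest : List String) : ∀ acc,
    pvALoop rest true acc = acc ++ (rest.takeWhile (fun l => !pvStop l)).filter (fun l => !pvTrig l) := by
  induction rest with
  | nil => intro acc; simp [pvALoop]
  | cons l rest ih =>
    intro acc
    by_cases ht : pvTrig l = true
    · simp [pvALoop, ht, pvTrig_not_stop l ht, ih]
    · by_cases hs : pvStop l = true
      · simp [pvALoop, ht, hs]
      · simp only [Bool.not_eq_true] at ht hs
        simp [pvALoop, ht, hs, ih]

-- before the section, A's loop just scans for the first trigger line
theorem pvALoop_false (lines : List String) : ∀ acc,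
    pvALoop lines false acc =
      match pvFindRest lines with
      | none => acc
      | some rest => pvALoop rest true acc := by
  induction lines with
  | nil => intro acc; simp [pvALoop, pvFindRest]
  | cons l rest ih =>
    intro acc
    by_cases ht : pvTrig l = true
    · simp [pvALoop, ht, pvFindRest]
    · simp only [Bool.not_eq_true] at ht
      simp [pvALoop, ht, pvFindRest, ih]

-- ===== VERDICT (by name: the statement is the Claim_ definition above) =====
theorem extract_component_specs_py_spec : Claim_equal_extract_component_specs_py := by
  intro prd _
  unfold Spec_extract_component_specs_py extract_component_specs_py extract_component_specs_py_alt
  rw [pvALoop_false]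
  cases pvFindRest ((PySem.Str.split? prd "\n").getD []) with
  | none => rfl
  | some rest => simp [pvALoop_true]
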